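-- pv_equiv track=rewrite | github.com/huggin/lc | 202602/3637.py | isTrionic
-- ===== SOURCE A (Python) =====
-- from typing import List
--
-- def isTrionic(nums: List[int]) -> bool:
--     n = len(nums)
--     if n == 3:
--         return False
--     if nums[1] <= nums[0]:
--         return False
--     for i in range(2, n):
--         if nums[i] == nums[i-1]:
--             return False
--     cnt = 0
--     i = 0
--     flag = 1
--     while i < n:
--         j = i + 1
--         while j < n and (nums[j] - nums[j-1]) * flag > 0:
--             j += 1
--         if j != n:
--             cnt += 1
--             if cnt > 2:
--                 return False
--             flag *= -1
--         i = j
--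
--     return cnt == 2
-- ===== SOURCE B (Python) =====
-- from typing import List
--
-- def isTrionic(nums: List[int]) -> bool:
--     if len(nums) == 3:
--         return False
--     if nums[1] <= nums[0]:
--         return False
--     sigs = [(b > a) - (b < a) for a, b in zip(nums, nums[1:])]
--     if 0 in sigs:
--         return False
--     runs = 1 + sum(1 for x, y in zip(sigs, sigs[1:]) if x != y)
--     return runs == 3
-- ===== Notes on version B (the rewrite author's own statement) =====
-- stated objective: alternative
-- what changed: A scans for direction changes with a nested while loop carrying an index/flag/counter state machine; B builds the list of difference signs once, rejects any zero sign, and returns whether the sign list has exactly 3 maximal runs (counted as 1 + adjacent sign changes).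
-- outside the precondition, e.g. on isTrionic([1]): A raises IndexError, B raises IndexError
import Mathlib
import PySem

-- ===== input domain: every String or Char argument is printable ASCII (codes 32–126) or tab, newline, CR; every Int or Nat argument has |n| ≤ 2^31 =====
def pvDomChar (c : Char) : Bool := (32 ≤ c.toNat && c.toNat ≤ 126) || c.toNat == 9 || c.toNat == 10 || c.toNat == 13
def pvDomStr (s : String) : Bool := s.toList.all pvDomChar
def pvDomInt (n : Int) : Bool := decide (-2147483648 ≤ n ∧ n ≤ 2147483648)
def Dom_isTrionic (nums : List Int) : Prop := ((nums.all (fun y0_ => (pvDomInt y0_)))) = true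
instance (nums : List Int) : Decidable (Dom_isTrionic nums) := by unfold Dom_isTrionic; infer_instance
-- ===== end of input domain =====

-- B replaces A's nested while-loop flag/counter state machine by a one-shot difference-sign
-- list whose maximal runs are counted; equivalence of the return values is proved on lists of
-- length ≥ 2 (A raises IndexError on shorter input).

-- ===== PORT A =====
-- for i in range(2, n): if nums[i] == nums[i-1]: return False
def aEqAdj (nums : List Int) : Bool :=
  (PySem.List.pyRange 2 (nums.length : Int) 1).any
    (fun i => PySem.List.pyGetD nums i 0 == PySem.List.pyGetD nums (i - 1) 0)

-- inner:  while j < n and (nums[j] - nums[j-1]) * flag > 0: j += 1   (returns the final j)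
def aInner (nums : List Int) (flag : Int) (j : Nat) : Nat :=
  if h : j < nums.length ∧
      (PySem.List.pyGetD nums (j : Int) 0 - PySem.List.pyGetD nums ((j : Int) - 1) 0) * flag > 0 then
    aInner nums flag (j + 1)
  else j
termination_by nums.length - j
decreasing_by omega

-- the port's outer loop needs this to terminate (j = aInner … (i+1) > i)
theorem aInner_ge (nums : List Int) (flag : Int) (j : Nat) : j ≤ aInner nums flag j := by
  rw [aInner]
  split
  · have := aInner_ge nums flag (j + 1); omega
  · exact Nat.le_refl j
termination_by nums.length - j
decreasing_by omega

-- outer:  while i < n: j = inner; if j != n: cnt += 1; if cnt > 2: return False; flag *= -1; i = j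
def aOuter (nums : List Int) (i cnt : Nat) (flag : Int) : Bool :=
  if _h : i < nums.length then
    -- j = aInner nums flag (i + 1)  (the let is inlined)
    if aInner nums flag (i + 1) ≠ nums.length then
      if cnt + 1 > 2 then false
      else aOuter nums (aInner nums flag (i + 1)) (cnt + 1) (-flag)
    else aOuter nums (aInner nums flag (i + 1)) cnt flag
  else cnt == 2
termination_by nums.length - i
decreasing_by
  all_goals (have := aInner_ge nums flag (i + 1); omega)

def isTrionic (nums : List Int) : Bool :=
  if nums.length = 3 then false
  else if PySem.List.pyGetD nums 1 0 ≤ PySem.List.pyGetD nums 0 0 then false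
  else if aEqAdj nums then false
  else aOuter nums 0 0 1

-- ===== PORT B =====
-- (b > a) - (b < a)
def bSign (a b : Int) : Int := (if b > a then 1 else 0) - (if b < a then 1 else 0)

def isTrionic_alt (nums : List Int) : Bool :=
  if nums.length = 3 then false
  else if PySem.List.pyGetD nums 1 0 ≤ PySem.List.pyGetD nums 0 0 then false
  else
    -- sigs = [(b > a) - (b < a) for a, b in zip(nums, nums[1:])]
    let sigs := (nums.zip (PySem.List.slice nums (some 1) none)).map (fun p => bSign p.1 p.2)
    if sigs.contains 0 then false
    else decide (1 + ((sigs.zip sigs.tail).filter (fun p => p.1 ≠ p.2)).length = 3)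

-- ===== PRECONDITION & SPEC =====
-- A evaluates nums[1] (after the len == 3 early return): lists of length < 2 raise IndexError.
def Pre_isTrionic (nums : List Int) : Prop := 2 ≤ nums.length
instance (nums : List Int) : Decidable (Pre_isTrionic nums) := by unfold Pre_isTrionic; infer_instance

def pvWitness_isTrionic : List Int := [1, 3, 2, 4, 5]

def Spec_isTrionic (nums : List Int) (out : Bool) : Prop := out = isTrionic_alt nums
instance (nums : List Int) (out : Bool) : Decidable (Spec_isTrionic nums out) := by unfold Spec_isTrionic; infer_instance

-- ===== CLAIM (what is proved, stated in full; the proofs are below) =====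
def Claim_equal_isTrionic : Prop := ∀ (nums : List Int), Dom_isTrionic nums → Pre_isTrionic nums → Spec_isTrionic nums (isTrionic nums)

-- ===== LEMMAS AND PROOFS =====

-- the difference list nums[k+1] - nums[k]
def diffs (nums : List Int) : List Int := (nums.zip nums.tail).map (fun p => p.2 - p.1)

-- sign of a single difference
def sg (d : Int) : Int := (if 0 < d then 1 else 0) - (if d < 0 then 1 else 0)

-- abstract form of A's outer loop: number of direction stops over the remaining diff list
def stops (flag : Int) : List Int → Nat
  | [] => 0
  | d :: t => if d * flag > 0 then stops flag t else 1 + stops (-flag) t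

-- number of adjacent sign changes (B counts these via zip/filter)
def changes : List Int → Nat
  | x :: y :: t => (if x = y then 0 else 1) + changes (y :: t)
  | _ => 0

theorem length_diffs (nums : List Int) : (diffs nums).length = nums.length - 1 := by
  simp [diffs, List.length_tail]

theorem diffs_getElem (nums : List Int) (k : Nat) (h : k < (diffs nums).length) :
    (diffs nums)[k] = nums[k + 1]'(by rw [length_diffs] at h; omega) - nums[k]'(by rw [length_diffs] at h; omega) := by
  simp [diffs, List.getElem_zip, List.getElem_tail]

theorem inner_eq (nums : List Int) (flag : Int) :
    ∀ (t : List Int) (j : Nat), 1 ≤ j → (diffs nums).drop (j - 1) = t →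
      aInner nums flag j = j + (t.takeWhile (fun d => decide (d * flag > 0))).length
  | [], j, hj, ht => by
    have hlen : (diffs nums).length ≤ j - 1 := by
      by_contra hc
      push_neg at hc
      have := (List.drop_eq_nil_iff).mp ht
      omega
    rw [length_diffs] at hlen
    rw [aInner]
    have hnc : ¬ (j < nums.length ∧
        (PySem.List.pyGetD nums (j : Int) 0 - PySem.List.pyGetD nums ((j : Int) - 1) 0) * flag > 0) := by
      intro ⟨h1, _⟩; omega
    rw [dif_neg hnc]
    simp
  | d :: t', j, hj, ht => by
    have hlt : j - 1 < (diffs nums).length := by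
      by_contra hc
      push_neg at hc
      rw [List.drop_eq_nil_iff.mpr hc] at ht
      simp at ht
    have hld := length_diffs nums
    have hjn : j < nums.length := by omega
    have hj1 : j - 1 + 1 = j := by omega
    have hdc : (diffs nums).drop (j - 1) = (diffs nums)[j - 1] :: (diffs nums).drop j := by
      rw [List.drop_eq_getElem_cons hlt, hj1]
    rw [ht] at hdc
    injection hdc with hd hts
    have ht' : (diffs nums).drop j = t' := hts.symm
    have hdval : d = nums[j] - nums[j - 1]'(by omega) := by
      rw [hd, diffs_getElem nums (j - 1) hlt]
      congr 2 <;> omega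
    have hget1 : PySem.List.pyGetD nums (j : Int) 0 = nums[j] := by
      rw [PySem.List.pyGetD_natCast]
      exact List.getD_eq_getElem nums 0 hjn
    have hget2 : PySem.List.pyGetD nums ((j : Int) - 1) 0 = nums[j - 1]'(by omega) := by
      have : (j : Int) - 1 = ((j - 1 : Nat) : Int) := by omega
      rw [this, PySem.List.pyGetD_natCast]
      exact List.getD_eq_getElem nums 0 (by omega)
    rw [aInner]
    by_cases hc : d * flag > 0
    · have hcond : j < nums.length ∧
          (PySem.List.pyGetD nums (j : Int) 0 - PySem.List.pyGetD nums ((j : Int) - 1) 0) * flag > 0 := by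
        refine ⟨hjn, ?_⟩
        rw [hget1, hget2, ← hdval]
        exact hc
      rw [dif_pos hcond]
      have ih := inner_eq nums flag t' (j + 1) (by omega) (by simpa using ht')
      rw [ih, List.takeWhile_cons_of_pos (by simpa using hc)]
      simp
      omega
    · have hcond : ¬ (j < nums.length ∧
          (PySem.List.pyGetD nums (j : Int) 0 - PySem.List.pyGetD nums ((j : Int) - 1) 0) * flag > 0) := by
        intro ⟨_, hx⟩
        rw [hget1, hget2, ← hdval] at hx
        exact hc hx
      rw [dif_neg hcond]
      rw [List.takeWhile_cons_of_neg (by simpa using hc)]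
      simp

theorem dropWhile_eq_drop_takeWhile {α : Type} (p : α → Bool) :
    ∀ (t : List α), t.dropWhile p = t.drop (t.takeWhile p).length
  | [] => rfl
  | a :: t => by
    by_cases h : p a
    · rw [List.dropWhile_cons_of_pos h, List.takeWhile_cons_of_pos h]
      simpa using dropWhile_eq_drop_takeWhile p t
    · rw [List.dropWhile_cons_of_neg (by simpa using h), List.takeWhile_cons_of_neg (by simpa using h)]
      simp

theorem dropWhile_head_neg {α : Type} (p : α → Bool) :
    ∀ (t : List α) (d : α) (r : List α), t.dropWhile p = d :: r → p d = false
  | [], d, r, h => by simp at h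
  | a :: t, d, r, h => by
    by_cases ha : p a
    · rw [List.dropWhile_cons_of_pos ha] at h
      exact dropWhile_head_neg p t d r h
    · rw [List.dropWhile_cons_of_neg (by simpa using ha)] at h
      injection h with h1 _
      rw [← h1]
      simpa using ha

theorem stops_dropWhile (flag : Int) :
    ∀ (t : List Int), stops flag (t.dropWhile (fun d => decide (d * flag > 0))) = stops flag t
  | [] => rfl
  | d :: t => by
    by_cases h : d * flag > 0
    · rw [List.dropWhile_cons_of_pos (by simpa using h)]
      rw [stops_dropWhile flag t]
      simp [stops, h]
    · rw [List.dropWhile_cons_of_neg (by simpa using h)]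

theorem outer_eq (nums : List Int) (i cnt : Nat) (flag : Int) :
    aOuter nums i cnt flag = decide (cnt + stops flag ((diffs nums).drop i) = 2) := by
  rw [aOuter]
  by_cases hi : i < nums.length
  · rw [dif_pos hi]
    have hjdef := inner_eq nums flag ((diffs nums).drop i) (i + 1) (by omega) (by simp)
    set p : Int → Bool := fun d => decide (d * flag > 0) with hp
    set t : List Int := (diffs nums).drop i with htdef
    set L : Nat := (t.takeWhile p).length with hLdef
    have hLle : L ≤ t.length := by
      rw [hLdef]
      simpa using List.IsPrefix.length_le (List.takeWhile_prefix p)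
    have htlen : t.length = nums.length - 1 - i := by
      rw [htdef, List.length_drop, length_diffs]
    have hdw : t.dropWhile p = t.drop L := dropWhile_eq_drop_takeWhile p t
    have hdw2 : t.drop L = (diffs nums).drop (i + L) := by
      simp [htdef, List.drop_drop, Nat.add_comm]
    rcases hdwc : t.dropWhile p with _ | ⟨d, rest⟩
    · -- inner ran to the end: j = n
      have hLfull : t.length ≤ L := by
        rw [hdw] at hdwc
        have := List.drop_eq_nil_iff.mp hdwc
        omega
      have hjn : aInner nums flag (i + 1) = nums.length := by
        rw [hjdef]; omega
      rw [hjn]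
      simp only [ne_eq, not_true_eq_false, if_false]
      rw [aOuter]
      rw [dif_neg (by omega)]
      have hst : stops flag t = 0 := by
        rw [← stops_dropWhile flag t, hdwc]
        rfl
      rw [hst]
      by_cases hc : cnt = 2 <;> simp [hc]
    · -- inner stopped early: j < n
      have hdfalse : p d = false := dropWhile_head_neg p t d rest hdwc
      have hrest : (diffs nums).drop (i + L) = d :: rest := by
        rw [← hdw2, ← hdw, hdwc]
      have hLlt : L < t.length := by
        by_contra hc
        push_neg at hc
        rw [hdw, List.drop_eq_nil_iff.mpr (by omega)] at hdwc
        simp at hdwc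
      have hjlt : aInner nums flag (i + 1) < nums.length := by
        rw [hjdef]; omega
      rw [hjdef]
      simp only [ne_eq]
      rw [if_pos (by omega)]
      have hst : stops flag t = 1 + stops (-flag) rest := by
        rw [← stops_dropWhile flag t, hdwc]
        simp only [stops]
        rw [if_neg (by simpa [hp] using hdfalse)]
      rw [hst]
      by_cases hcnt : cnt + 1 > 2
      · rw [if_pos hcnt]
        exact (decide_eq_false (by omega)).symm
      · rw [if_neg hcnt]
        have ih := outer_eq nums (i + 1 + L) (cnt + 1) (-flag)
        have hdrop : (diffs nums).drop (i + 1 + L) = rest := by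
          have : (diffs nums).drop (i + L + 1) = ((diffs nums).drop (i + L)).tail := by
            rw [← List.drop_drop]
            simp
          rw [show i + 1 + L = i + L + 1 by omega, this, hrest]
          rfl
        rw [ih, hdrop]
        exact decide_eq_decide.mpr (by omega)
  · rw [dif_neg hi]
    have : (diffs nums).drop i = [] := by
      rw [List.drop_eq_nil_iff, length_diffs]
      omega
    rw [this]
    by_cases hc : cnt = 2 <;> simp [stops, hc]
termination_by nums.length - i
decreasing_by
  omega

theorem sg_eq_zero_iff (d : Int) : sg d = 0 ↔ d = 0 := by
  unfold sg
  split_ifs <;> omega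

theorem mul_sg_pos (d : Int) (hd : d ≠ 0) : d * sg d > 0 := by
  unfold sg
  rcases lt_or_gt_of_ne hd with h | h
  · rw [if_neg (by omega), if_pos h]
    nlinarith
  · rw [if_pos h, if_neg (by omega)]
    nlinarith

theorem sg_pm (d : Int) (hd : d ≠ 0) : sg d = 1 ∨ sg d = -1 := by
  unfold sg
  split_ifs <;> omega

theorem stops_eq_changes :
    ∀ (t : List Int) (d : Int), d ≠ 0 → (∀ x ∈ t, x ≠ 0) →
      stops (sg d) (d :: t) = changes ((d :: t).map sg)
  | [], d, hd, _ => by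
    simp [stops, changes, mul_sg_pos d hd]
  | e :: t', d, hd, hall => by
    have he : e ≠ 0 := hall e (by simp)
    have hall' : ∀ x ∈ t', x ≠ 0 := fun x hx => hall x (by simp [hx])
    have hstep : stops (sg d) (d :: e :: t') = stops (sg d) (e :: t') := by
      simp [stops, mul_sg_pos d hd]
    have ih := stops_eq_changes t' e he hall'
    by_cases hde : sg d = sg e
    · rw [hstep, hde, ih]
      simp [changes, hde]
    · have hneg : sg e = -sg d := by
        rcases sg_pm d hd with h1 | h1 <;> rcases sg_pm e he with h2 | h2 <;> omega
      have hefail : ¬ (e * sg d > 0) := by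
        have hpos := mul_sg_pos e he
        have : e * sg d = -(e * sg e) := by rw [hneg]; ring
        omega
      have hnext : stops (sg d) (e :: t') = 1 + stops (sg e) t' := by
        simp only [stops]
        rw [if_neg hefail, ← hneg]
      have hee : stops (sg e) (e :: t') = stops (sg e) t' := by
        simp [stops, mul_sg_pos e he]
      rw [hstep, hnext, show changes ((d :: e :: t').map sg) = 1 + changes ((e :: t').map sg) by
        simp [changes, hde] <;> omega]
      rw [← ih, hee]

theorem changes_eq_zipfilter :
    ∀ (s : List Int), ((s.zip s.tail).filter (fun p => decide (p.1 ≠ p.2))).length = changes s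
  | [] => rfl
  | [_] => rfl
  | x :: y :: t => by
    have ih := changes_eq_zipfilter (y :: t)
    simp only [ne_eq, decide_not, List.tail_cons] at ih ⊢
    rw [List.zip_cons_cons, List.filter_cons]
    by_cases h : x = y <;> simp [changes, h, ih] <;> omega

-- sigs as built by B equals (diffs nums).map sg
theorem sigs_eq (nums : List Int) :
    (nums.zip (PySem.List.slice nums (some 1) none)).map (fun p => bSign p.1 p.2)
      = (diffs nums).map sg := by
  rw [PySem.List.slice_from_one]
  unfold diffs
  rw [List.map_map]
  apply List.map_congr_left
  intro p _
  simp only [Function.comp, bSign, sg]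
  rcases lt_trichotomy p.1 p.2 with h | h | h
  · rw [if_pos h, if_pos (show (0 : Int) < p.2 - p.1 by omega),
      if_neg (show ¬ p.2 < p.1 by omega), if_neg (show ¬ p.2 - p.1 < 0 by omega)]
  · rw [if_neg (show ¬ p.1 < p.2 by omega), if_neg (show ¬ (0 : Int) < p.2 - p.1 by omega),
      if_neg (show ¬ p.2 < p.1 by omega), if_neg (show ¬ p.2 - p.1 < 0 by omega)]
  · rw [if_neg (show ¬ p.1 < p.2 by omega), if_neg (show ¬ (0 : Int) < p.2 - p.1 by omega),
      if_pos h, if_pos (show p.2 - p.1 < 0 by omega)]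

theorem eqAdj_iff (nums : List Int) (h2 : 2 ≤ nums.length)
    (hgt : PySem.List.pyGetD nums 0 0 < PySem.List.pyGetD nums 1 0) :
    aEqAdj nums = ((diffs nums).map sg).contains 0 := by
  have hgetD : ∀ (i : Int), 0 ≤ i → PySem.List.pyGetD nums i 0 = nums.getD i.toNat 0 := by
    intro i hi
    conv_lhs => rw [show i = ((i.toNat : Nat) : Int) from by omega, PySem.List.pyGetD_natCast]
  have hdiff : ∀ k (hk : k + 1 < nums.length),
      (diffs nums)[k]'(by rw [length_diffs]; omega) = nums.getD (k + 1) 0 - nums.getD k 0 := by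
    intro k hk
    rw [diffs_getElem nums k (by rw [length_diffs]; omega),
      List.getD_eq_getElem nums 0 (show k + 1 < nums.length by omega),
      List.getD_eq_getElem nums 0 (show k < nums.length by omega)]
  have hd0 : nums.getD 0 0 < nums.getD 1 0 := by
    have h' := hgt
    rw [hgetD 0 (by omega), hgetD 1 (by omega)] at h'
    exact h' 
  apply Bool.eq_iff_iff.mpr
  rw [aEqAdj, List.any_eq_true, List.contains_eq_any_beq, List.any_eq_true]
  constructor
  · rintro ⟨i, hmem, hbeq⟩
    rw [PySem.List.mem_pyRange_one] at hmem
    obtain ⟨hi2, hin⟩ := hmem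
    rw [hgetD i (by omega), hgetD (i - 1) (by omega)] at hbeq
    have heq : nums.getD i.toNat 0 = nums.getD (i - 1).toNat 0 := eq_of_beq hbeq
    have hk1 : (i - 1).toNat = i.toNat - 1 := by omega
    have hk2 : i.toNat - 1 + 1 = i.toNat := by omega
    rw [hk1] at heq
    refine ⟨0, List.mem_map.mpr ⟨(diffs nums)[i.toNat - 1]'(by rw [length_diffs]; omega),
      List.getElem_mem _, ?_⟩, by simp⟩
    rw [hdiff (i.toNat - 1) (by omega), sg_eq_zero_iff, hk2]
    omega
  · rintro ⟨x, hmem, hbeq⟩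
    have hx0 : x = 0 := (eq_of_beq hbeq).symm
    subst hx0
    obtain ⟨d, hd, hsg⟩ := List.mem_map.mp hmem
    obtain ⟨k, hk, hdk⟩ := List.mem_iff_getElem.mp hd
    rw [length_diffs] at hk
    have hdz : d = 0 := (sg_eq_zero_iff d).mp hsg
    have hdval : nums.getD (k + 1) 0 - nums.getD k 0 = 0 := by
      rw [← hdiff k (by omega), hdk]
      exact hdz
    have hk0 : k ≠ 0 := by
      intro h
      subst h
      simp only [Nat.zero_add] at hdval
      omega
    refine ⟨((k : Int) + 1), ?_, ?_⟩
    · rw [PySem.List.mem_pyRange_one]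
      omega
    · rw [hgetD ((k : Int) + 1) (by omega), hgetD ((k : Int) + 1 - 1) (by omega)]
      have ea : ((k : Int) + 1).toNat = k + 1 := by omega
      have eb : ((k : Int) + 1 - 1).toNat = k := by omega
      rw [ea, eb]
      simp only [beq_iff_eq]
      omega

-- ===== VERDICT (by name: the statement is the Claim_ definition above) =====
theorem isTrionic_spec : Claim_equal_isTrionic := by
  intro nums _ hpre
  unfold Pre_isTrionic at hpre
  unfold Spec_isTrionic isTrionic isTrionic_alt
  by_cases h3 : nums.length = 3
  · simp [h3]
  · rw [if_neg h3, if_neg h3]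
    by_cases hle : PySem.List.pyGetD nums 1 0 ≤ PySem.List.pyGetD nums 0 0
    · rw [if_pos hle, if_pos hle]
    · rw [if_neg hle, if_neg hle]
      push_neg at hle
      rw [sigs_eq nums]
      rw [eqAdj_iff nums hpre hle]
      by_cases hz : ((diffs nums).map sg).contains 0
      · rw [if_pos hz, if_pos hz]
      · rw [if_neg hz, if_neg hz]
        -- no zero differences: relate the two counters
        have hall : ∀ x ∈ diffs nums, x ≠ 0 := by
          intro x hx hx0
          apply hz
          rw [List.contains_eq_any_beq, List.any_eq_true]
          exact ⟨0, List.mem_map.mpr ⟨x, hx, by rw [hx0]; rfl⟩, by simp⟩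
        have hne : diffs nums ≠ [] := by
          intro h
          have := length_diffs nums
          rw [h] at this
          simp at this
          omega
        obtain ⟨d, t, hdt⟩ := List.exists_cons_of_ne_nil hne
        have hg : (diffs nums)[0]'(by rw [length_diffs]; omega) = d := by
          simpa using List.getElem_of_eq hdt (by rw [length_diffs]; omega)
        have hd0 : d = nums[1]'(by omega) - nums[0]'(by omega) := by
          have hge := diffs_getElem nums 0 (by rw [length_diffs]; omega)
          rw [hg] at hge
          simpa using hge
        have h0 : PySem.List.pyGetD nums 0 0 = nums[0]'(by omega) := by
          rw [show (0 : Int) = (((0 : Nat) : Nat) : Int) from rfl, PySem.List.pyGetD_natCast]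
          exact List.getD_eq_getElem nums 0 (by omega)
        have h1 : PySem.List.pyGetD nums 1 0 = nums[1]'(by omega) := by
          rw [show (1 : Int) = (((1 : Nat) : Nat) : Int) from rfl, PySem.List.pyGetD_natCast]
          exact List.getD_eq_getElem nums 0 (by omega)
        have hdpos : 0 < d := by
          rw [hd0, ← h0, ← h1]
          omega
        have hsgd : sg d = 1 := by
          unfold sg
          rw [if_pos hdpos, if_neg (by omega)]
          norm_num
        have houter := outer_eq nums 0 0 1
        simp only [List.drop_zero] at houter
        rw [houter]
        have hstops : stops 1 (diffs nums) = changes ((diffs nums).map sg) := by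
          rw [hdt, ← hsgd]
          exact stops_eq_changes t d (by omega) (fun x hx => hall x (by rw [hdt]; simp [hx]))
        have hcz := changes_eq_zipfilter ((diffs nums).map sg)
        exact decide_eq_decide.mpr (by omega)
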